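-- pv_equiv track=rewrite | github.com/erict-catchfire/tinydiff | baked_unit_modeling/truth_table.py | _compute_outputs_signed
-- ===== SOURCE A (Python) =====
-- SIGNED_MIN = -128
--
-- SIGNED_MAX = 127
--
-- def _signed_from_u8(value: int) -> int:
--     if value < 128:
--         return value
--     return value - 256
--
-- def _clamp_signed_8(value: int) -> int:
--     if value < SIGNED_MIN:
--         return SIGNED_MIN
--     if value > SIGNED_MAX:
--         return SIGNED_MAX
--     return value
--
-- def _split_sizes(x: int, y: int) -> list[int]:
--     """
--     Split x inputs across y outputs.
--
--     We keep earlier outputs as floor-sized chunks and assign the remainder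
--     to later outputs. For y=2 this matches:
--     - out0: floor(x/2)
--     - out1: ceil(x/2)
--     """
--     base = x // y
--     remainder = x % y
--     sizes = [base] * y
--     for idx in range(y - remainder, y):
--         if remainder == 0:
--             break
--         sizes[idx] += 1
--     return sizes
--
-- def _compute_outputs_signed(
--     input_values_u8: tuple[int, ...],
--     weights: list[int],
--     y: int,
-- ) -> list[int]:
--     signed_inputs = [_signed_from_u8(value) for value in input_values_u8]
--     products = [signed_inputs[idx] * weights[idx] for idx in range(len(weights))]
--
--     split_sizes = _split_sizes(len(weights), y)
--     outputs: list[int] = []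
--     start = 0
--     for out_idx, chunk_size in enumerate(split_sizes):
--         end = start + chunk_size
--         partial_sum = sum(products[start:end])
--         outputs.append(_clamp_signed_8(partial_sum))
--         start = end
--     return outputs
-- ===== SOURCE B (Python) =====
-- SIGNED_MIN = -128
-- SIGNED_MAX = 127
--
-- def _compute_outputs_signed(input_values_u8, weights, y):
--     # Scatter: one pass over indices; each index computes its output bucket
--     # arithmetically and accumulates there; no chunk loop, no slicing.
--     n = len(weights)
--     base, remainder = divmod(n, y)
--     t = (y - remainder) * base  # first index belonging to a (base+1)-sized bucket
--     totals = [0] * y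
--     for i in range(n):
--         v = input_values_u8[i]
--         s = v - 256 if v >= 128 else v
--         k = i // base if i < t else (y - remainder) + (i - t) // (base + 1)
--         totals[k] += s * weights[i]
--     return [max(SIGNED_MIN, min(SIGNED_MAX, tot)) for tot in totals]
-- ===== Notes on version B (the rewrite author's own statement) =====
-- stated objective: alternative
-- what changed: B replaces A's gather (loop over chunks, slice the precomputed products list per chunk) by a scatter: a single pass over indices in which each index computes its output bucket by closed-form floor-division arithmetic and accumulates its signed product there, clamping the bucket totals at the end.
-- outside the precondition, e.g. on _compute_outputs_signed((5,), [1], -1): A returns [], B raises IndexError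
import Mathlib
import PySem

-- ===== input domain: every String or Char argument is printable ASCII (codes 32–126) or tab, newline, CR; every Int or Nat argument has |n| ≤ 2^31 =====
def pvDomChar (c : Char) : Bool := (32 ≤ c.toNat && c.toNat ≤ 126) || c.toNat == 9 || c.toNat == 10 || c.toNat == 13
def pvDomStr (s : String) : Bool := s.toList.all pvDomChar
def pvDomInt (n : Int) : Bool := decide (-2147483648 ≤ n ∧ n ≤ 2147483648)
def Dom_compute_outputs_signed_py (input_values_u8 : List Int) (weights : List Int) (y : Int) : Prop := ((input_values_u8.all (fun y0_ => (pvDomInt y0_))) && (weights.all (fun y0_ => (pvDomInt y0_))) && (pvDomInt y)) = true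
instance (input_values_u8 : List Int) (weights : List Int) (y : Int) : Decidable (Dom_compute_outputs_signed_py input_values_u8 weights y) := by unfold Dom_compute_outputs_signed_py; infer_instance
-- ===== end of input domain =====

-- B replaces A's gather (loop over chunks, slicing a precomputed products list) by a scatter:
-- one pass over indices, each index computing its output bucket by floor-division arithmetic
-- and accumulating its signed product there; bucket totals are clamped at the end.

-- ===== PORT A =====
def signedFromU8 (value : Int) : Int := if value < 128 then value else value - 256

def clampSigned8 (value : Int) : Int :=
  if value < -128 then -128 else if value > 127 then 127 else value

def splitSizesA (x y : Int) : List Int :=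
  let base := PySem.Int.floordiv x y
  let remainder := PySem.Int.mod x y
  let sizes := List.replicate y.toNat base
  if remainder == 0 then sizes
  else (PySem.List.pyRange (y - remainder) y 1).foldl
    (fun s idx => PySem.List.pySetD s idx (PySem.List.pyGetD s idx 0 + 1)) sizes

def compute_outputs_signed_py (input_values_u8 : List Int) (weights : List Int) (y : Int) : List Int :=
  let signed_inputs := input_values_u8.map signedFromU8
  let products := (PySem.List.pyRange 0 weights.length 1).map
    (fun idx => PySem.List.pyGetD signed_inputs idx 0 * PySem.List.pyGetD weights idx 0)
  let split_sizes := splitSizesA weights.length y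
  (split_sizes.foldl (fun (acc : List Int × Int) chunk_size =>
      let e := acc.2 + chunk_size
      (acc.1 ++ [clampSigned8 ((PySem.List.slice products (some acc.2) (some e)).sum)], e))
    ([], 0)).1

-- ===== PORT B =====
def compute_outputs_signed_py_alt (input_values_u8 : List Int) (weights : List Int) (y : Int) : List Int :=
  let n : Int := weights.length
  let base := PySem.Int.floordiv n y
  let remainder := PySem.Int.mod n y
  let t := (y - remainder) * base
  let totals := (PySem.List.pyRange 0 n 1).foldl (fun outs i =>
      let v := PySem.List.pyGetD input_values_u8 i 0
      let s := if 128 ≤ v then v - 256 else v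
      let k := if i < t then PySem.Int.floordiv i base
               else (y - remainder) + PySem.Int.floordiv (i - t) (base + 1)
      PySem.List.pySetD outs k (PySem.List.pyGetD outs k 0 + s * PySem.List.pyGetD weights i 0))
    (List.replicate y.toNat 0)
  totals.map (fun tot => max (-128) (min 127 tot))

-- ===== PRECONDITION & SPEC =====
-- Pre_ excludes the inputs on which A raises — y = 0 (ZeroDivisionError in x // y) and
-- len(weights) > len(input_values_u8) (IndexError building the products list) — and y < 0,
-- where A's empty-list result is an accident of Python's list-times-negative-count and B's
-- bucket scatter raises IndexError on any nonempty weights.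
def Pre_compute_outputs_signed_py (input_values_u8 : List Int) (weights : List Int) (y : Int) : Prop :=
  0 < y ∧ weights.length ≤ input_values_u8.length
instance (input_values_u8 : List Int) (weights : List Int) (y : Int) : Decidable (Pre_compute_outputs_signed_py input_values_u8 weights y) := by unfold Pre_compute_outputs_signed_py; infer_instance

def pvWitness_compute_outputs_signed_py : List Int × List Int × Int := ([200, 3, 7], [1, -2, 5], 2)

def Spec_compute_outputs_signed_py (input_values_u8 : List Int) (weights : List Int) (y : Int) (out : List Int) : Prop := out = compute_outputs_signed_py_alt input_values_u8 weights y
instance (input_values_u8 : List Int) (weights : List Int) (y : Int) (out : List Int) : Decidable (Spec_compute_outputs_signed_py input_values_u8 weights y out) := by unfold Spec_compute_outputs_signed_py; infer_instance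

-- ===== CLAIM (what is proved, stated in full; the proofs are below) =====
def Claim_equal_compute_outputs_signed_py : Prop := ∀ (input_values_u8 : List Int) (weights : List Int) (y : Int), Dom_compute_outputs_signed_py input_values_u8 weights y → Pre_compute_outputs_signed_py input_values_u8 weights y → Spec_compute_outputs_signed_py input_values_u8 weights y (compute_outputs_signed_py input_values_u8 weights y)

-- ===== LEMMAS AND PROOFS =====

-- chunk size of output k (A's split_sizes entry, B's implicit bucket width)
def pvSize (n y k : Int) : Int :=
  PySem.Int.floordiv n y + if y - PySem.Int.mod n y ≤ k then 1 else 0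

-- first input index of output k's chunk
def pvStart (n y k : Int) : Int :=
  k * PySem.Int.floordiv n y + max 0 (k - (y - PySem.Int.mod n y))

-- contribution of input index i
def pvC (iv w : List Int) (i : Int) : Int :=
  (if 128 ≤ PySem.List.pyGetD iv i 0 then PySem.List.pyGetD iv i 0 - 256
   else PySem.List.pyGetD iv i 0) * PySem.List.pyGetD w i 0

-- unclamped dot product of chunk k
def pvRaw (iv w : List Int) (y k : Int) : Int :=
  ((PySem.List.pyRange (pvStart (w.length : Int) y k) (pvStart (w.length : Int) y (k+1)) 1).map
    (pvC iv w)).sum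

theorem clamp_eq_max_min (v : Int) : clampSigned8 v = max (-128) (min 127 v) := by
  unfold clampSigned8; split_ifs <;> omega

theorem pvStart_succ (n y k : Int) : pvStart n y (k+1) = pvStart n y k + pvSize n y k := by
  unfold pvStart pvSize
  have h : (k+1) * PySem.Int.floordiv n y = k * PySem.Int.floordiv n y + PySem.Int.floordiv n y := by ring
  split_ifs <;> omega

theorem pvStart_zero (n y : Int) (hy : 0 < y) : pvStart n y 0 = 0 := by
  have h1 := PySem.Int.mod_lt n hy
  unfold pvStart
  have : (0:Int) * PySem.Int.floordiv n y = 0 := by ring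
  omega

theorem pvStart_top (n y : Int) (hy : 0 < y) (_hn : 0 ≤ n) : pvStart n y y = n := by
  have h1 := PySem.Int.mod_nonneg n hy
  have h2 := PySem.Int.floordiv_mul_add_mod n y
  unfold pvStart
  have h3 : y * PySem.Int.floordiv n y = PySem.Int.floordiv n y * y := by ring
  omega

theorem base_nonneg (n y : Int) (hy : 0 < y) (hn : 0 ≤ n) : 0 ≤ PySem.Int.floordiv n y := by
  rw [PySem.Int.floordiv_eq_ediv_of_pos hy]
  exact Int.ediv_nonneg hn (by omega)

theorem pvStart_le_top (n y m : Int) (hy : 0 < y) (hn : 0 ≤ n) (hm : m ≤ y) :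
    pvStart n y m ≤ n := by
  have h1 := PySem.Int.mod_nonneg n hy
  have h2 := pvStart_top n y hy hn
  have hb := base_nonneg n y hy hn
  have h3 : m * PySem.Int.floordiv n y ≤ y * PySem.Int.floordiv n y :=
    mul_le_mul_of_nonneg_right hm hb
  unfold pvStart at *
  omega

theorem pvStart_nonneg (n y k : Int) (hy : 0 < y) (hn : 0 ≤ n) (hk : 0 ≤ k) :
    0 ≤ pvStart n y k := by
  have hb := base_nonneg n y hy hn
  have := mul_nonneg hk hb
  unfold pvStart; omega

-- bucket formula: an index inside chunk k's range is assigned bucket k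
theorem bucket_arith (base r y k i : Int) (hb : 0 <= base) (_hr0 : 0 <= r) (_hrlt : r < y)
    (_hk0 : 0 <= k)
    (hlo : k * base + max 0 (k - (y - r)) <= i)
    (hhi : i < k * base + max 0 (k - (y - r)) + (base + if y - r <= k then 1 else 0)) :
    (if i < (y - r) * base then PySem.Int.floordiv i base
     else (y - r) + PySem.Int.floordiv (i - (y - r) * base) (base + 1)) = k := by
  by_cases hcase : k < y - r
  · rw [if_neg (by omega)] at hhi
    have hmax : max 0 (k - (y - r)) = 0 := by omega
    rw [hmax] at hlo hhi
    have hbpos : 0 < base := by by_contra h; omega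
    have hit : i < (y - r) * base := by
      have h1 : (k+1) * base = k * base + base := by ring
      have h2 : (k+1) * base <= (y - r) * base :=
        mul_le_mul_of_nonneg_right (by omega) (by omega)
      omega
    rw [if_pos hit, PySem.Int.floordiv_eq_iff_of_pos hbpos]
    have h1 : (k+1) * base = k * base + base := by ring
    exact ⟨by omega, by omega⟩
  · rw [if_pos (by omega)] at hhi
    have hmax : max 0 (k - (y - r)) = k - (y - r) := by omega
    rw [hmax] at hlo hhi
    have hge : (y - r) * base <= i := by
      have h2 : (y - r) * base <= k * base :=
        mul_le_mul_of_nonneg_right (by omega) hb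
      omega
    rw [if_neg (by omega)]
    have key : PySem.Int.floordiv (i - (y - r) * base) (base + 1) = k - (y - r) := by
      rw [PySem.Int.floordiv_eq_iff_of_pos (by omega)]
      have e1 : (k - (y - r)) * (base + 1) + (y - r) * base = k * base + (k - (y - r)) := by ring
      have e2 : (k - (y - r) + 1) * (base + 1) + (y - r) * base
          = k * base + (k - (y - r)) + (base + 1) := by ring
      exact ⟨by omega, by omega⟩
    omega

theorem bucket_eq (n y k i : Int) (hy : 0 < y) (hn : 0 <= n)
    (hk0 : 0 <= k) (_hky : k < y)
    (hlo : pvStart n y k <= i) (hhi : i < pvStart n y k + pvSize n y k) :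
    (if i < (y - PySem.Int.mod n y) * PySem.Int.floordiv n y
       then PySem.Int.floordiv i (PySem.Int.floordiv n y)
       else (y - PySem.Int.mod n y) +
         PySem.Int.floordiv (i - (y - PySem.Int.mod n y) * PySem.Int.floordiv n y)
           (PySem.Int.floordiv n y + 1)) = k := by
  unfold pvStart at hlo hhi
  unfold pvSize at hhi
  exact bucket_arith (PySem.Int.floordiv n y) (PySem.Int.mod n y) y k i
    (base_nonneg n y hy hn) (PySem.Int.mod_nonneg n hy) (PySem.Int.mod_lt n hy)
    hk0 hlo hhi

-- previous-style helpers for A's split_sizes list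
theorem fold_incr_eq (y : Int) : ∀ (m : Nat) (a : Int) (s : List Int), 0 ≤ a → a ≤ y →
    (y - a).toNat = m → s.length = y.toNat →
    (PySem.List.pyRange a y 1).foldl
      (fun s idx => PySem.List.pySetD s idx (PySem.List.pyGetD s idx 0 + 1)) s
    = (PySem.List.pyRange 0 y 1).map
        (fun k => PySem.List.pyGetD s k 0 + if a ≤ k then 1 else 0) := by
  intro m
  induction m with
  | zero =>
    intro a s h0 hay hm hs
    rw [PySem.List.pyRange_one_eq_nil (by omega)]
    simp only [List.foldl_nil]
    have h1 : (PySem.List.pyRange 0 y 1).map (fun k => PySem.List.pyGetD s k 0 + if a ≤ k then 1 else 0)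
         = (PySem.List.pyRange 0 y 1).map (fun k => PySem.List.pyGetD s k 0) := by
      apply List.map_congr_left
      intro k hk
      have hk' := (PySem.List.mem_pyRange_one).mp hk
      have : ¬ a ≤ k := by omega
      simp [this]
    rw [h1]
    have hy : (s.length : Int) = y := by omega
    rw [← hy]
    exact (PySem.List.map_pyGetD_pyRange_zero' s 0).symm
  | succ m ih =>
    intro a s h0 hay hm hs
    rw [PySem.List.pyRange_one_cons (by omega)]
    simp only [List.foldl_cons]
    rw [ih (a + 1) _ (by omega) (by omega) (by omega)
        (by rw [PySem.List.length_pySetD]; exact hs)]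
    apply List.map_congr_left
    intro k hk
    have hk' := (PySem.List.mem_pyRange_one).mp hk
    have e1 : PySem.List.pyGetD (PySem.List.pySetD s a (PySem.List.pyGetD s a 0 + 1)) k 0
        = if k = a then PySem.List.pyGetD s a 0 + 1 else PySem.List.pyGetD s k 0 := by
      rw [PySem.List.pySetD_of_nonneg s (PySem.List.pyGetD s a 0 + 1) (show (0:Int) ≤ a by omega)]
      rw [PySem.List.pyGetD_eq_getElem (s.set a.toNat (PySem.List.pyGetD s a 0 + 1)) 0
        (by omega) (by simp; omega)]
      rw [List.getElem_set]
      by_cases hka : k = a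
      · simp [hka]
      · have : ¬ a.toNat = k.toNat := by omega
        simp [this, hka]
        exact (PySem.List.pyGetD_eq_getElem s 0 (by omega) (by omega)).symm
    rw [e1]
    by_cases hka : k = a
    · simp [hka]
    · rw [if_neg hka]
      congr 1
      split_ifs <;> omega

-- For 0 < y, A's split-sizes list lists the chunk sizes pvSize.
theorem splitSizesA_eq (x y : Int) (_hx : 0 ≤ x) (hy : 0 < y) :
    splitSizesA x y = (PySem.List.pyRange 0 y 1).map (fun k => pvSize x y k) := by
  unfold splitSizesA pvSize
  have hr0 : 0 ≤ PySem.Int.mod x y := PySem.Int.mod_nonneg x hy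
  have hrlt : PySem.Int.mod x y < y := PySem.Int.mod_lt x hy
  by_cases hr : PySem.Int.mod x y = 0
  · rw [if_pos (by simp [hr])]
    have h1 : (PySem.List.pyRange 0 y 1).map
        (fun k => PySem.Int.floordiv x y + if y - PySem.Int.mod x y ≤ k then 1 else 0)
        = (PySem.List.pyRange 0 y 1).map (fun _ => PySem.Int.floordiv x y) := by
      apply List.map_congr_left
      intro k hk
      have hk' := (PySem.List.mem_pyRange_one).mp hk
      rw [if_neg (by omega), add_zero]
    rw [h1, List.map_const', PySem.List.length_pyRange_one]
    congr 1
    omega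
  · rw [if_neg (by simp [hr])]
    rw [fold_incr_eq y ((y - (y - PySem.Int.mod x y)).toNat) (y - PySem.Int.mod x y)
      (List.replicate y.toNat (PySem.Int.floordiv x y)) (by omega) (by omega) rfl
      (List.length_replicate)]
    apply List.map_congr_left
    intro k hk
    have hk' := (PySem.List.mem_pyRange_one).mp hk
    have e1 : PySem.List.pyGetD (List.replicate y.toNat (PySem.Int.floordiv x y)) k 0
        = PySem.Int.floordiv x y := by
      rw [PySem.List.pyGetD_eq_getElem _ 0 (by omega) (by simp; omega)]
      simp
    rw [e1]

-- One chunk on A's side: the slice-of-products sum is the chunk's raw dot product.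
theorem chunk_sum_eq (input_values_u8 weights : List Int)
    (hlen : weights.length ≤ input_values_u8.length) (s c : Int)
    (hs : 0 ≤ s) (hc : 0 ≤ c)
    (hsc : s + c ≤ (weights.length : Int)) :
    (PySem.List.slice ((PySem.List.pyRange 0 weights.length 1).map
        (fun idx => PySem.List.pyGetD (input_values_u8.map signedFromU8) idx 0 *
          PySem.List.pyGetD weights idx 0)) (some s) (some (s + c))).sum
    = ((PySem.List.pyRange s (s + c) 1).map (pvC input_values_u8 weights)).sum := by
  obtain ⟨sn, rfl⟩ : ∃ sn : Nat, s = (sn : Int) := ⟨s.toNat, by omega⟩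
  obtain ⟨cn, rfl⟩ : ∃ cn : Nat, c = (cn : Int) := ⟨c.toNat, by omega⟩
  rw [PySem.List.slice_natCast_add]
  rw [← List.map_drop, ← List.map_take]
  rw [PySem.List.pyRange_one_append 0 (sn : Int) weights.length (by omega) (by omega),
    List.drop_left' (by rw [PySem.List.length_pyRange_one]; omega)]
  rw [PySem.List.pyRange_one_append (sn : Int) ((sn : Int) + (cn : Int)) weights.length
      (by omega) (by omega),
    List.take_left' (by rw [PySem.List.length_pyRange_one]; omega)]
  apply congrArg
  apply List.map_congr_left
  intro i hi
  have hi' := (PySem.List.mem_pyRange_one).mp hi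
  have hii : i < ((input_values_u8.map signedFromU8).length : Int) := by
    rw [List.length_map]; omega
  rw [PySem.List.pyGetD_eq_getElem (input_values_u8.map signedFromU8) 0 (by omega) hii]
  rw [List.getElem_map]
  unfold pvC signedFromU8
  rw [PySem.List.pyGetD_eq_getElem input_values_u8 0 (by omega) (by omega)]
  split_ifs <;> omega

-- A's chunk loop, started at chunk a, appends the clamped raw chunk sums.
theorem a_fold_eq (input_values_u8 weights : List Int) (y : Int)
    (hlen : weights.length ≤ input_values_u8.length) (hy : 0 < y) :
    ∀ (m : Nat) (a : Int) (acc : List Int), 0 ≤ a → a ≤ y → (y - a).toNat = m →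
    (((PySem.List.pyRange a y 1).map (fun k => pvSize (weights.length : Int) y k)).foldl
      (fun (acc : List Int × Int) chunk_size =>
        let e := acc.2 + chunk_size
        (acc.1 ++ [clampSigned8 ((PySem.List.slice
            ((PySem.List.pyRange 0 weights.length 1).map
              (fun idx => PySem.List.pyGetD (input_values_u8.map signedFromU8) idx 0 *
                PySem.List.pyGetD weights idx 0)) (some acc.2) (some e)).sum)], e))
      (acc, pvStart (weights.length : Int) y a)).1
    = acc ++ (PySem.List.pyRange a y 1).map
        (fun k => clampSigned8 (pvRaw input_values_u8 weights y k)) := by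
  intro m
  induction m with
  | zero =>
    intro a acc h0 hay hm
    rw [PySem.List.pyRange_one_eq_nil (a := a) (b := y) (by omega)]
    simp
  | succ m ih =>
    intro a acc h0 hay hm
    rw [PySem.List.pyRange_one_cons (a := a) (b := y) (by omega)]
    simp only [List.map_cons, List.foldl_cons]
    have hstep : pvStart (weights.length : Int) y a + pvSize (weights.length : Int) y a
        = pvStart (weights.length : Int) y (a+1) := (pvStart_succ _ _ _).symm
    have hs0 : 0 ≤ pvStart (weights.length : Int) y a :=
      pvStart_nonneg _ y a hy (by omega) h0
    have hsz : 0 ≤ pvSize (weights.length : Int) y a := by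
      have := base_nonneg (weights.length : Int) y hy (by omega)
      unfold pvSize; split_ifs <;> omega
    have hub : pvStart (weights.length : Int) y (a+1) ≤ (weights.length : Int) :=
      pvStart_le_top _ y (a+1) hy (by omega) (by omega)
    have hone : (PySem.List.slice
        ((PySem.List.pyRange 0 weights.length 1).map
          (fun idx => PySem.List.pyGetD (input_values_u8.map signedFromU8) idx 0 *
            PySem.List.pyGetD weights idx 0))
        (some (pvStart (weights.length : Int) y a))
        (some (pvStart (weights.length : Int) y a + pvSize (weights.length : Int) y a))).sum
        = pvRaw input_values_u8 weights y a := by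
      rw [chunk_sum_eq input_values_u8 weights hlen _ _ hs0 hsz (by omega)]
      unfold pvRaw
      rw [hstep]
    rw [hone, hstep]
    rw [ih (a+1) (acc ++ [clampSigned8 (pvRaw input_values_u8 weights y a)])
        (by omega) (by omega) (by omega)]
    simp

-- B's scatter over one chunk's index range adds the chunk sum into bucket k.
theorem b_chunk_fold (input_values_u8 weights : List Int) (y : Int) :
    ∀ (r : List Int) (k : Int) (outs : List Int), 0 <= k → k < (outs.length : Int) →
    (∀ i ∈ r,
      (if i < (y - PySem.Int.mod (weights.length : Int) y) * PySem.Int.floordiv (weights.length : Int) y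
         then PySem.Int.floordiv i (PySem.Int.floordiv (weights.length : Int) y)
         else (y - PySem.Int.mod (weights.length : Int) y) +
           PySem.Int.floordiv (i - (y - PySem.Int.mod (weights.length : Int) y) * PySem.Int.floordiv (weights.length : Int) y)
             (PySem.Int.floordiv (weights.length : Int) y + 1)) = k) →
    r.foldl (fun outs i =>
        let v := PySem.List.pyGetD input_values_u8 i 0
        let s := if 128 <= v then v - 256 else v
        let kk := if i < (y - PySem.Int.mod (weights.length : Int) y) * PySem.Int.floordiv (weights.length : Int) y
               then PySem.Int.floordiv i (PySem.Int.floordiv (weights.length : Int) y)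
               else (y - PySem.Int.mod (weights.length : Int) y) +
                 PySem.Int.floordiv (i - (y - PySem.Int.mod (weights.length : Int) y) * PySem.Int.floordiv (weights.length : Int) y)
                   (PySem.Int.floordiv (weights.length : Int) y + 1)
        PySem.List.pySetD outs kk (PySem.List.pyGetD outs kk 0 + s * PySem.List.pyGetD weights i 0))
      outs
    = outs.set k.toNat
        (PySem.List.pyGetD outs k 0 + (r.map (pvC input_values_u8 weights)).sum) := by
  intro r
  induction r with
  | nil =>
    intro k outs hk0 hkl _
    simp only [List.foldl_nil, List.map_nil, List.sum_nil, add_zero]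
    apply List.ext_getElem (by simp)
    intro j hj hj'
    rw [List.getElem_set]
    split_ifs with hj1
    · subst hj1
      exact (PySem.List.pyGetD_eq_getElem outs 0 (by omega) (by omega)).symm
    · rfl
  | cons i r ih =>
    intro k outs hk0 hkl hall
    simp only [List.foldl_cons]
    have hbk := hall i (by simp)
    rw [hbk]
    have hset : PySem.List.pySetD outs k
        (PySem.List.pyGetD outs k 0 +
          (if 128 <= PySem.List.pyGetD input_values_u8 i 0 then PySem.List.pyGetD input_values_u8 i 0 - 256
           else PySem.List.pyGetD input_values_u8 i 0) * PySem.List.pyGetD weights i 0)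
        = outs.set k.toNat (PySem.List.pyGetD outs k 0 + pvC input_values_u8 weights i) := by
      rw [PySem.List.pySetD_of_nonneg outs _ hk0]
      unfold pvC
      rfl
    rw [hset]
    rw [ih k _ hk0 (by simp; omega) (fun j hj => hall j (by simp [hj]))]
    rw [List.set_set]
    have hget : PySem.List.pyGetD
        (outs.set k.toNat (PySem.List.pyGetD outs k 0 + pvC input_values_u8 weights i)) k 0
        = PySem.List.pyGetD outs k 0 + pvC input_values_u8 weights i := by
      rw [PySem.List.pyGetD_eq_getElem _ 0 (by omega) (by simp; omega)]
      rw [List.getElem_set]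
      simp
    rw [hget]
    simp only [List.map_cons, List.sum_cons]
    congr 1
    ring


-- B's whole scatter, started at chunk a, fills buckets a..y-1 with their raw sums.
theorem b_fold_eq (input_values_u8 weights : List Int) (y : Int) (hy : 0 < y) :
    ∀ (m : Nat) (a : Int) (outs : List Int), 0 ≤ a → a ≤ y → (y - a).toNat = m →
    outs.length = y.toNat →
    (PySem.List.pyRange (pvStart (weights.length : Int) y a) (weights.length : Int) 1).foldl
      (fun outs i =>
        let v := PySem.List.pyGetD input_values_u8 i 0
        let s := if 128 ≤ v then v - 256 else v
        let k := if i < (y - PySem.Int.mod (weights.length : Int) y) * PySem.Int.floordiv (weights.length : Int) y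
               then PySem.Int.floordiv i (PySem.Int.floordiv (weights.length : Int) y)
               else (y - PySem.Int.mod (weights.length : Int) y) +
                 PySem.Int.floordiv (i - (y - PySem.Int.mod (weights.length : Int) y) * PySem.Int.floordiv (weights.length : Int) y)
                   (PySem.Int.floordiv (weights.length : Int) y + 1)
        PySem.List.pySetD outs k (PySem.List.pyGetD outs k 0 + s * PySem.List.pyGetD weights i 0))
      outs
    = (PySem.List.pyRange 0 y 1).map
        (fun j => PySem.List.pyGetD outs j 0 + if a ≤ j then pvRaw input_values_u8 weights y j else 0) := by
  intro m
  induction m with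
  | zero =>
    intro a outs h0 hay hm houts
    have ha : a = y := by omega
    rw [ha]
    rw [pvStart_top _ y hy (by omega)]
    rw [PySem.List.pyRange_one_eq_nil (by omega)]
    simp only [List.foldl_nil]
    have h1 : (PySem.List.pyRange 0 y 1).map
        (fun j => PySem.List.pyGetD outs j 0 + if y ≤ j then pvRaw input_values_u8 weights y j else 0)
        = (PySem.List.pyRange 0 y 1).map (fun j => PySem.List.pyGetD outs j 0) := by
      apply List.map_congr_left
      intro j hj
      have hj' := (PySem.List.mem_pyRange_one).mp hj
      rw [if_neg (by omega), add_zero]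
    rw [h1]
    have hyl : (outs.length : Int) = y := by omega
    rw [← hyl]
    exact (PySem.List.map_pyGetD_pyRange_zero' outs 0).symm
  | succ m ih =>
    intro a outs h0 hay hm houts
    have hsplit : PySem.List.pyRange (pvStart (weights.length : Int) y a) (weights.length : Int) 1
        = PySem.List.pyRange (pvStart (weights.length : Int) y a) (pvStart (weights.length : Int) y (a+1)) 1
          ++ PySem.List.pyRange (pvStart (weights.length : Int) y (a+1)) (weights.length : Int) 1 := by
      apply PySem.List.pyRange_one_append
      · rw [pvStart_succ]
        have := base_nonneg (weights.length : Int) y hy (by omega)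
        unfold pvSize; split_ifs <;> omega
      · exact pvStart_le_top _ y (a+1) hy (by omega) (by omega)
    rw [hsplit, List.foldl_append]
    rw [b_chunk_fold input_values_u8 weights y _ a outs h0 (by omega)
      (fun i hi => by
        have hi' := (PySem.List.mem_pyRange_one).mp hi
        rw [pvStart_succ] at hi'
        exact bucket_eq (weights.length : Int) y a i hy (by omega) h0 (by omega) hi'.1 hi'.2)]
    have hraw : ((PySem.List.pyRange (pvStart (weights.length : Int) y a)
          (pvStart (weights.length : Int) y (a+1)) 1).map (pvC input_values_u8 weights)).sum
        = pvRaw input_values_u8 weights y a := by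
      unfold pvRaw; rfl
    rw [hraw]
    rw [ih (a+1) _ (by omega) (by omega) (by omega) (by simp [houts])]
    apply List.map_congr_left
    intro j hj
    have hj' := (PySem.List.mem_pyRange_one).mp hj
    have e1 : PySem.List.pyGetD (outs.set a.toNat (PySem.List.pyGetD outs a 0 + pvRaw input_values_u8 weights y a)) j 0
        = if j = a then PySem.List.pyGetD outs a 0 + pvRaw input_values_u8 weights y a
          else PySem.List.pyGetD outs j 0 := by
      rw [PySem.List.pyGetD_eq_getElem _ 0 (by omega) (by simp; omega)]
      rw [List.getElem_set]
      by_cases hja : j = a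
      · simp [hja]
      · have : ¬ a.toNat = j.toNat := by omega
        simp [this, hja]
        exact (PySem.List.pyGetD_eq_getElem outs 0 (by omega) (by omega)).symm
    rw [e1]
    by_cases hja : j = a
    · subst hja
      rw [if_pos rfl, if_neg (by omega), if_pos (by omega)]
      ring
    · rw [if_neg hja]
      congr 1
      split_ifs <;> omega

theorem compute_outputs_signed_py_spec : Claim_equal_compute_outputs_signed_py := by
  intro input_values_u8 weights y _ hpre
  unfold Spec_compute_outputs_signed_py
  obtain ⟨hy, hlen⟩ := hpre
  unfold compute_outputs_signed_py compute_outputs_signed_py_alt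
  dsimp only
  rw [splitSizesA_eq (weights.length : Int) y (by omega) hy]
  have hA := a_fold_eq input_values_u8 weights y hlen hy ((y - 0).toNat) 0 [] (by omega) (by omega) rfl
  rw [pvStart_zero _ y hy] at hA
  rw [hA]
  have hB := b_fold_eq input_values_u8 weights y hy ((y - 0).toNat) 0
    (List.replicate y.toNat 0) (by omega) (by omega) rfl (List.length_replicate)
  rw [pvStart_zero _ y hy] at hB
  rw [hB]
  rw [List.map_map]
  apply List.map_congr_left
  intro k hk
  have hk' := (PySem.List.mem_pyRange_one).mp hk
  have e1 : PySem.List.pyGetD (List.replicate y.toNat (0:Int)) k 0 = 0 := by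
    rw [PySem.List.pyGetD_eq_getElem _ 0 (by omega) (by simp; omega)]
    simp
  simp only [Function.comp, e1, if_pos hk'.1, zero_add]
  exact clamp_eq_max_min _

-- ===== VERDICT (by name: the statement is the Claim_ definition above) =====
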